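-- pv_equiv track=rewrite | github.com/whistle-hikhi/agentic_drug_rec | agent/codebook.py | icd9_proc_desc
-- ===== SOURCE A (Python) =====
-- _ICD9_PROC_RANGES = [
--     ((0,   5),   "Nervous System Operations"),
--     ((6,   7),   "Endocrine System Operations"),
--     ((8,  16),   "Eye Operations"),
--     ((18, 20),   "Ear Operations"),
--     ((21, 29),   "Nose, Mouth & Pharynx Operations"),
--     ((30, 34),   "Respiratory System Operations"),
--     ((35, 39),   "Cardiovascular Operations"),
--     ((40, 41),   "Hemic & Lymphatic Operations"),
--     ((42, 54),   "Digestive System Operations"),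
--     ((55, 59),   "Urinary System Operations"),
--     ((60, 64),   "Male Genital Operations"),
--     ((65, 71),   "Female Genital Operations"),
--     ((72, 75),   "Obstetrical Procedures"),
--     ((76, 84),   "Musculoskeletal Operations"),
--     ((85, 86),   "Integumentary Operations"),
--     ((87, 99),   "Diagnostic & Therapeutic Procedures"),
-- ]
--
-- def icd9_proc_desc(code: str) -> str:
--     code = str(code).strip()
--     try:
--         prefix2 = int(code[:2])
--         for (lo, hi), category in _ICD9_PROC_RANGES:
--             if lo <= prefix2 <= hi:
--                 return category
--     except (ValueError, IndexError):
--         pass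
--     return f"Procedure {code}"
-- ===== SOURCE B (Python) =====
-- _ICD9_PROC_RANGES = [
--     ((0,   5),   "Nervous System Operations"),
--     ((6,   7),   "Endocrine System Operations"),
--     ((8,  16),   "Eye Operations"),
--     ((18, 20),   "Ear Operations"),
--     ((21, 29),   "Nose, Mouth & Pharynx Operations"),
--     ((30, 34),   "Respiratory System Operations"),
--     ((35, 39),   "Cardiovascular Operations"),
--     ((40, 41),   "Hemic & Lymphatic Operations"),
--     ((42, 54),   "Digestive System Operations"),
--     ((55, 59),   "Urinary System Operations"),
--     ((60, 64),   "Male Genital Operations"),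
--     ((65, 71),   "Female Genital Operations"),
--     ((72, 75),   "Obstetrical Procedures"),
--     ((76, 84),   "Musculoskeletal Operations"),
--     ((85, 86),   "Integumentary Operations"),
--     ((87, 99),   "Diagnostic & Therapeutic Procedures"),
-- ]
--
-- # Built once: direct prefix -> category table; uncovered prefixes (e.g. 17) are absent.
-- _ICD9_PROC_TABLE = {
--     p: category
--     for (lo, hi), category in _ICD9_PROC_RANGES
--     for p in range(lo, hi + 1)
-- }
--
-- def icd9_proc_desc(code: str) -> str:
--     code = str(code).strip()
--     try:
--         category = _ICD9_PROC_TABLE.get(int(code[:2]))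
--     except (ValueError, IndexError):
--         category = None
--     return category if category is not None else f"Procedure {code}"
-- ===== Notes on version B (the rewrite author's own statement) =====
-- stated objective: simpler
-- what changed: Replaces the per-call linear scan over the 16 range rows with a single lookup in a prefix->category table precomputed once from the range list (uncovered prefixes like 17 simply absent).
import Mathlib
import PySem

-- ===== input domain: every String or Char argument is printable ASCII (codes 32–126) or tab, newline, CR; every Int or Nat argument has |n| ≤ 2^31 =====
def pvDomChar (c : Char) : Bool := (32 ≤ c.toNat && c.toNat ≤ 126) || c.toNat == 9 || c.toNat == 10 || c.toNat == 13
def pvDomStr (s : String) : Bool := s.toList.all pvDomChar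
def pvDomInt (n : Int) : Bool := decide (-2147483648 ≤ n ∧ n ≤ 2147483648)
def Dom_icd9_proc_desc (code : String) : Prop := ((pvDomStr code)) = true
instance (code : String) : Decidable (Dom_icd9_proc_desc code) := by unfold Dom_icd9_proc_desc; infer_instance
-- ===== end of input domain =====

-- B replaces A's per-call linear scan over the 16 range rows by one lookup in a
-- prefix -> category table built once from the range list (objective: simpler).

-- shared module constant _ICD9_PROC_RANGES
def pvRanges : List ((Int × Int) × String) :=
  [((0, 5), "Nervous System Operations"),
   ((6, 7), "Endocrine System Operations"),
   ((8, 16), "Eye Operations"),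
   ((18, 20), "Ear Operations"),
   ((21, 29), "Nose, Mouth & Pharynx Operations"),
   ((30, 34), "Respiratory System Operations"),
   ((35, 39), "Cardiovascular Operations"),
   ((40, 41), "Hemic & Lymphatic Operations"),
   ((42, 54), "Digestive System Operations"),
   ((55, 59), "Urinary System Operations"),
   ((60, 64), "Male Genital Operations"),
   ((65, 71), "Female Genital Operations"),
   ((72, 75), "Obstetrical Procedures"),
   ((76, 84), "Musculoskeletal Operations"),
   ((85, 86), "Integumentary Operations"),
   ((87, 99), "Diagnostic & Therapeutic Procedures")]

-- ===== PORT A =====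
-- A's for-loop over the ranges, returning the first matching category
def pvScanA : List ((Int × Int) × String) → Int → Option String
  | [], _ => none
  | ((lo, hi), category) :: rest, p =>
      if lo ≤ p ∧ p ≤ hi then some category else pvScanA rest p

def icd9_proc_desc (code : String) : String :=
  let c := PySem.Str.strip code
  match PySem.Int.ofStr? (PySem.Str.slice c none (some 2)) with
  | some prefix2 =>
      match pvScanA pvRanges prefix2 with
      | some category => category
      | none => "Procedure " ++ c
  | none => "Procedure " ++ c

-- ===== PORT B =====
-- _ICD9_PROC_TABLE, built once by the dict comprehension over pvRanges
def pvTableB : PySem.Dict Int String :=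
  PySem.Dict.mk (pvRanges.flatMap (fun r =>
    (PySem.List.pyRange r.1.1 (r.1.2 + 1) 1).map (fun p => (p, r.2))))

def icd9_proc_desc_alt (code : String) : String :=
  let c := PySem.Str.strip code
  let category : Option String :=
    match PySem.Int.ofStr? (PySem.Str.slice c none (some 2)) with
    | some p => pvTableB.get? p
    | none => none
  match category with
  | some cat => cat
  | none => "Procedure " ++ c

-- ===== PRECONDITION & SPEC =====
def Spec_icd9_proc_desc (code : String) (out : String) : Prop := out = icd9_proc_desc_alt code
instance (code : String) (out : String) : Decidable (Spec_icd9_proc_desc code out) := by unfold Spec_icd9_proc_desc; infer_instance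

-- ===== CLAIM (what is proved, stated in full; the proofs are below) =====
def Claim_equal_icd9_proc_desc : Prop := ∀ (code : String), Dom_icd9_proc_desc code → Spec_icd9_proc_desc code (icd9_proc_desc code)

-- ===== LEMMAS AND PROOFS =====

lemma pvScan_none_of_nomatch (l : List ((Int × Int) × String)) (p : Int)
    (h : ∀ r ∈ l, ¬(r.1.1 ≤ p ∧ p ≤ r.1.2)) : pvScanA l p = none := by
  induction l with
  | nil => rfl
  | cons a t ih =>
    obtain ⟨⟨lo, hi⟩, c⟩ := a
    rw [pvScanA, if_neg (show ¬(lo ≤ p ∧ p ≤ hi) from h ((lo, hi), c) (by simp))]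
    exact ih (fun r hr => h r (List.mem_cons_of_mem _ hr))

lemma pvScanA_none_of_out (p : Int) (h : p < 0 ∨ 99 < p) : pvScanA pvRanges p = none := by
  have hb : ∀ r ∈ pvRanges, 0 ≤ r.1.1 ∧ r.1.2 ≤ 99 := by decide
  exact pvScan_none_of_nomatch _ _ (fun r hr => by have := hb r hr; omega)

lemma pvTableB_none_of_out (p : Int) (h : p < 0 ∨ 99 < p) : pvTableB.get? p = none := by
  rw [PySem.Dict.get?_eq_none_iff_not_mem_keys]
  have hk : ∀ k ∈ pvTableB.keys, 0 ≤ k ∧ k ≤ 99 := by decide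
  intro hmem
  have := hk p hmem
  omega

lemma pvScan_eq_table (p : Int) : pvScanA pvRanges p = pvTableB.get? p := by
  by_cases h : 0 ≤ p ∧ p ≤ 99
  · obtain ⟨h1, h2⟩ := h
    interval_cases p <;> decide
  · rw [pvScanA_none_of_out p (by omega), pvTableB_none_of_out p (by omega)]

-- ===== VERDICT (by name: the statement is the Claim_ definition above) =====
theorem icd9_proc_desc_spec : Claim_equal_icd9_proc_desc := by
  intro code _
  unfold Spec_icd9_proc_desc icd9_proc_desc icd9_proc_desc_alt
  cases hp : PySem.Int.ofStr? (PySem.Str.slice (PySem.Str.strip code) none (some 2)) with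
  | none => simp [hp]
  | some p => simp only [hp, pvScan_eq_table]
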